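-- pv_equiv track=rewrite | github.com/jingminzhang/taigongxinyi | jixia_swarm_complete.py | generate_debate_summary
-- ===== SOURCE A (Python) =====
-- from typing import Dict, List, Any, Optional
--
-- def generate_debate_summary(messages: List[Dict]) -> str:
--     """生成辩论摘要"""
--     positive_count = len([m for m in messages if m.get('stance') == 'positive'])
--     negative_count = len([m for m in messages if m.get('stance') == 'negative'])
--
--     summary = f"""
--     📊 辩论统计:
--     - 参与仙人: {len(set(m['speaker'] for m in messages))}位
--     - 看涨观点: {positive_count}条
--     - 看跌观点: {negative_count}条
--     - 总发言数: {len(messages)}条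
--
--     🎯 观点倾向: {'偏向看涨' if positive_count > negative_count else '偏向看跌' if negative_count > positive_count else '观点平衡'}
--     """
--
--     return summary
-- ===== SOURCE B (Python) =====
-- def generate_debate_summary(messages):
--     """Counting dict over stances + sort-then-scan (adjacent duplicates) for unique speakers."""
--     stances = [m.get('stance') for m in messages]
--     stance_counts = {}
--     for s in stances:
--         stance_counts[s] = stance_counts.get(s, 0) + 1
--     positive_count = stance_counts.get('positive', 0)
--     negative_count = stance_counts.get('negative', 0)
--
--     speakers = sorted(m['speaker'] for m in messages)
--     duplicate_adjacent = sum(1 for a, b in zip(speakers, speakers[1:]) if a == b)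
--     unique_speakers = len(speakers) - duplicate_adjacent
--
--     if positive_count > negative_count:
--         tendency = '偏向看涨'
--     elif negative_count > positive_count:
--         tendency = '偏向看跌'
--     else:
--         tendency = '观点平衡'
--
--     return f"""
--     📊 辩论统计:
--     - 参与仙人: {unique_speakers}位
--     - 看涨观点: {positive_count}条
--     - 看跌观点: {negative_count}条
--     - 总发言数: {len(messages)}条
--
--     🎯 观点倾向: {tendency}
--     """
-- ===== Notes on version B (the rewrite author's own statement) =====
-- stated objective: alternative
-- what changed: A's two filter passes are replaced by one counting dict keyed by stance, and the hash-set of speakers is replaced by sorting the speakers and subtracting the number of adjacent duplicate pairs.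
import Mathlib
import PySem

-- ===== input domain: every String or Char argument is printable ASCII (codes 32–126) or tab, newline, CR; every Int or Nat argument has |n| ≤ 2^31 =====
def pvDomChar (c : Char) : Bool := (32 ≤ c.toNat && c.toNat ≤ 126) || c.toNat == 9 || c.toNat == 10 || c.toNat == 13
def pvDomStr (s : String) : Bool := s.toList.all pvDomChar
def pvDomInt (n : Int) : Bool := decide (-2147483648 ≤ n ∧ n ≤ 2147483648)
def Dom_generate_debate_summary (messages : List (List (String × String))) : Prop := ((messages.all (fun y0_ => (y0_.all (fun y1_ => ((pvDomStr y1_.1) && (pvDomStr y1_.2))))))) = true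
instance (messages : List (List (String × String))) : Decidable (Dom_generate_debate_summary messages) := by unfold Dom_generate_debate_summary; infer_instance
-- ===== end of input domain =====

-- B counts stances with one counting dict and counts unique speakers by sorting and
-- subtracting adjacent duplicates; the equivalence is about the return value.

-- ===== PORT A =====
-- A: two filter passes for the stance counts, a set comprehension for speakers, then the f-string.
def generate_debate_summary (messages : List (List (String × String))) : String :=
  let positive_count : Int :=
    ((messages.filter (fun m => (PySem.Dict.get? (PySem.Dict.mk m) "stance") == some "positive")).length : Int)
  let negative_count : Int :=
    ((messages.filter (fun m => (PySem.Dict.get? (PySem.Dict.mk m) "stance") == some "negative")).length : Int)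
  -- m['speaker']: Pre_ guarantees the key is present, so getD's default is never used
  let speakers : PySem.Set String :=
    PySem.Set.ofList (messages.map (fun m => (PySem.Dict.get? (PySem.Dict.mk m) "speaker").getD ""))
  "\n    📊 辩论统计:\n    - 参与仙人: " ++ PySem.Int.toStr (speakers.length : Int)
    ++ "位\n    - 看涨观点: " ++ PySem.Int.toStr positive_count
    ++ "条\n    - 看跌观点: " ++ PySem.Int.toStr negative_count
    ++ "条\n    - 总发言数: " ++ PySem.Int.toStr (messages.length : Int)
    ++ "条\n\n    🎯 观点倾向: "
    ++ (if positive_count > negative_count then "偏向看涨"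
        else if negative_count > positive_count then "偏向看跌" else "观点平衡")
    ++ "\n    "

-- ===== PORT B =====
-- B: a counting dict keyed by m.get('stance'), then sort the speakers and subtract adjacent duplicates.
def generate_debate_summary_alt (messages : List (List (String × String))) : String :=
  let stances : List (Option String) :=
    messages.map (fun m => PySem.Dict.get? (PySem.Dict.mk m) "stance")
  let stance_counts : PySem.Dict (Option String) Int :=
    stances.foldl (fun d s => d.insert s (d.getD s 0 + 1)) PySem.Dict.empty
  let positive_count : Int := stance_counts.getD (some "positive") 0
  let negative_count : Int := stance_counts.getD (some "negative") 0
  -- m['speaker']: Pre_ guarantees the key is present, so getD's default is never used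
  let speakers : List String :=
    PySem.List.sorted (messages.map (fun m => (PySem.Dict.get? (PySem.Dict.mk m) "speaker").getD "")) (fun x => x) false
  let duplicate_adjacent : Int :=
    (((speakers.zip speakers.tail).countP (fun p => p.1 == p.2)) : Int)
  let unique_speakers : Int := (speakers.length : Int) - duplicate_adjacent
  let tendency :=
    if positive_count > negative_count then "偏向看涨"
    else if negative_count > positive_count then "偏向看跌" else "观点平衡"
  "\n    📊 辩论统计:\n    - 参与仙人: " ++ PySem.Int.toStr unique_speakers
    ++ "位\n    - 看涨观点: " ++ PySem.Int.toStr positive_count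
    ++ "条\n    - 看跌观点: " ++ PySem.Int.toStr negative_count
    ++ "条\n    - 总发言数: " ++ PySem.Int.toStr (messages.length : Int)
    ++ "条\n\n    🎯 观点倾向: " ++ tendency
    ++ "\n    "

-- ===== PRECONDITION & SPEC =====
-- Pre_ excludes messages missing the 'speaker' key, where both Pythons raise KeyError.
def Pre_generate_debate_summary (messages : List (List (String × String))) : Prop :=
  ∀ m ∈ messages, (PySem.Dict.get? (PySem.Dict.mk m) "speaker").isSome
instance (messages : List (List (String × String))) : Decidable (Pre_generate_debate_summary messages) := by unfold Pre_generate_debate_summary; infer_instance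
def pvWitness_generate_debate_summary : (List (List (String × String))) :=
  [[("speaker", "a"), ("stance", "positive")], [("speaker", "b")]]

def Spec_generate_debate_summary (messages : List (List (String × String))) (out : String) : Prop := out = generate_debate_summary_alt messages
instance (messages : List (List (String × String))) (out : String) : Decidable (Spec_generate_debate_summary messages out) := by unfold Spec_generate_debate_summary; infer_instance

-- ===== CLAIM (what is proved, stated in full; the proofs are below) =====
def Claim_equal_generate_debate_summary : Prop := ∀ (messages : List (List (String × String))), Dom_generate_debate_summary messages → Pre_generate_debate_summary messages → Spec_generate_debate_summary messages (generate_debate_summary messages)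

-- ===== LEMMAS AND PROOFS =====

-- B's counting dict looked up at a stance value is A's filter count.
theorem pvCountDict_eq (messages : List (List (String × String))) (v : String) :
    ((messages.map (fun m => PySem.Dict.get? (PySem.Dict.mk m) "stance")).foldl
        (fun d s => d.insert s (d.getD s 0 + 1)) PySem.Dict.empty).getD (some v) 0 =
      ((messages.filter (fun m => (PySem.Dict.get? (PySem.Dict.mk m) "stance") == some v)).length : Int) := by
  rw [PySem.Dict.getD_foldl_insert_add_one]
  simp only [PySem.Dict.getD_empty, zero_add, Int.natCast_inj,
    ← List.countP_eq_length_filter, List.count_eq_countP, List.countP_map]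
  exact List.countP_congr (fun m _ => by simp [Function.comp])

-- In a ≤-sorted list, the number of adjacent equal pairs plus the number of distinct
-- elements is the length.
theorem pvRuns_eq (l : List String) (h : l.Pairwise (· ≤ ·)) :
    l.length = (l.zip l.tail).countP (fun p => p.1 == p.2) + l.toFinset.card := by
  induction l with
  | nil => simp
  | cons a t ih =>
    cases t with
    | nil => simp
    | cons b t' =>
      have hpw : (b :: t').Pairwise (· ≤ ·) := h.tail
      have ih' := ih hpw
      by_cases hab : a = b
      · subst hab
        have hmem : a ∈ (a :: t').toFinset := by simp
        simp only [List.zip_cons_cons, List.tail_cons, List.countP_cons]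
        simp at ih' ⊢
        omega
      · have hnot : a ∉ b :: t' := by
          intro hmem
          rcases List.mem_cons.mp hmem with h' | hmem'
          · exact hab h'
          · have h1 : a ≤ b := (List.pairwise_cons.mp h).1 b (by simp)
            have h2 : b ≤ a := (List.pairwise_cons.mp hpw).1 a hmem'
            exact hab (le_antisymm h1 h2)
        simp only [List.zip_cons_cons, List.tail_cons, List.countP_cons]
        have : ((a, b).1 == (a, b).2) = false := by simpa using hab
        rw [List.toFinset_cons, Finset.card_insert_of_notMem (by simpa using hnot)]
        simp [this] at ih' ⊢
        omega

-- |set(xs)| is the number of distinct elements.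
theorem pvOfList_len (xs : List String) : (PySem.Set.ofList xs).length = xs.toFinset.card := by
  have hnd : (PySem.Set.ofList xs).Nodup := PySem.Set.nodup_ofList xs
  have hfs : (PySem.Set.ofList xs).toFinset = xs.toFinset := by
    ext x; simp [PySem.Set.mem_ofList]
  rw [← hfs, List.toFinset_card_of_nodup hnd]

-- B's sort-and-scan speaker count equals A's set size.
theorem pvSpeakers_eq (xs : List String) :
    ((PySem.List.sorted xs (fun x => x) false).length : Int) -
      (((PySem.List.sorted xs (fun x => x) false).zip (PySem.List.sorted xs (fun x => x) false).tail).countP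
        (fun p => p.1 == p.2) : Int) = ((PySem.Set.ofList xs).length : Int) := by
  have hpw : (PySem.List.sorted xs (fun x => x) false).Pairwise (· ≤ ·) := by
    simpa using PySem.List.sorted_pairwise xs (fun x => x)
  have hruns := pvRuns_eq _ hpw
  have hfin : (PySem.List.sorted xs (fun x => x) false).toFinset = xs.toFinset :=
    List.toFinset_eq_of_perm _ _ (PySem.List.sorted_perm xs (fun x => x) false)
  rw [pvOfList_len, ← hfin]
  omega

-- ===== VERDICT (by name: the statement is the Claim_ definition above) =====
theorem generate_debate_summary_spec : Claim_equal_generate_debate_summary := by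
  intro messages _ _
  unfold Spec_generate_debate_summary generate_debate_summary generate_debate_summary_alt
  simp only [pvCountDict_eq messages "positive", pvCountDict_eq messages "negative",
    pvSpeakers_eq]
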